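-- pv_equiv track=rewrite | github.com/Pequicu1/Advent-Of-Code-2024 | Days/Day8.py | get_antennas
-- ===== SOURCE A (Python) =====
-- def get_antennas(data):
--     rows = data.split('\n')
--     inp_map = []
--     antennas = {}
--     for i, row in enumerate(rows):
--         if row == '': continue
--
--         for j, c in enumerate(row):
--             if c != '.':
--                 #crear entrada mapa o añadir posición
--                 if c not in antennas.keys():
--                     antennas[c] = [(i,j)]
--                 else: antennas[c].append((i,j))
--         #añadir al mapa (matriz)
--         inp_map.append(row)
--
--     return inp_map, antennas
-- ===== SOURCE B (Python) =====
-- def get_antennas(data):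
--     rows = data.split('\n')
--     inp_map = [row for row in rows if row != '']
--     # char-major strategy: first the ordered set of distinct antenna characters,
--     # then one full-grid scan PER character for its positions
--     seen = []
--     for row in rows:
--         for ch in row:
--             if ch != '.' and ch not in seen:
--                 seen.append(ch)
--     antennas = {c: [(i, j)
--                     for i, row in enumerate(rows)
--                     for j, ch in enumerate(row) if ch == c]
--                 for c in seen}
--     return inp_map, antennas
-- ===== Notes on version B (the rewrite author's own statement) =====
-- stated objective: alternative
-- what changed: A builds the map and the antenna dict in one interleaved row-major pass with a key-membership branch; B is char-major: it first computes the ordered set of distinct antenna characters, then performs one separate full-grid scan per character to collect that character's positions.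
import Mathlib
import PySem

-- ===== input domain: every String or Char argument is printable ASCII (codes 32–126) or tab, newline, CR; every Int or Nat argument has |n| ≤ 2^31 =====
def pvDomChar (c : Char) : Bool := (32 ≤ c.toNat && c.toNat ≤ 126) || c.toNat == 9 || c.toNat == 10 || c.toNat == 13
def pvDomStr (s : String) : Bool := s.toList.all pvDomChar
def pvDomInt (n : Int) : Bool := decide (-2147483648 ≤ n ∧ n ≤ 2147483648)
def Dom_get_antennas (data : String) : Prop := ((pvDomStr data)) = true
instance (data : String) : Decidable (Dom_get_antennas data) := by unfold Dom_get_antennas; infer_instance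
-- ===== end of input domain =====

-- B replaces A's single interleaved map+dict pass by a char-major algorithm:
-- collect the ordered set of distinct antenna characters first, then one full-grid
-- scan per character for its positions; alternative decomposition, not faster.


-- ===== PORT A =====
-- the antenna dictionary of both ports (keys are the 1-char strings Python uses)
abbrev AntDict := PySem.Dict String (List (Int × Int))

def pvKey (c : Char) : String := String.ofList [c]

-- A's inner per-character step: 'if c != ".": if c not in antennas: … else append'
def pvStepA (i : Int) (d : AntDict) (q : Int × Char) : AntDict :=
  if q.2 ≠ '.' then
    if d.contains (pvKey q.2) then d.modify (pvKey q.2) [] (· ++ [(i, q.1)])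
    else d.insert (pvKey q.2) [(i, q.1)]
  else d

-- A's outer per-row step: skip '' rows, else scan the row then append it to the map
def pvOuterA (st : List String × AntDict) (p : Int × String) : List String × AntDict :=
  if p.2 = "" then st
  else (st.1 ++ [p.2], (PySem.List.enumerate p.2.toList).foldl (pvStepA p.1) st.2)

def get_antennas (data : String) : List String × (List (String × List (Int × Int))) :=
  let rows := (PySem.Str.split? data "\n").getD []   -- separator "\n" ≠ "": split? is always some
  let st := (PySem.List.enumerate rows).foldl pvOuterA ([], PySem.Dict.empty)
  (st.1, st.2.items)

-- ===== PORT B =====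
-- B's 'seen' loop over one row: 'if ch != "." and ch not in seen: seen.append(ch)'
def pvSeenRow (s : List Char) (row : String) : List Char :=
  row.toList.foldl (fun s ch => if ch ≠ '.' ∧ ch ∉ s then s ++ [ch] else s) s

-- B's per-character full-grid scan for the positions of c
def pvPositions (rows : List String) (c : Char) : List (Int × Int) :=
  (PySem.List.enumerate rows).flatMap (fun p =>
    ((PySem.List.enumerate p.2.toList).filter (fun q => q.2 == c)).map (fun q => (p.1, q.1)))

def get_antennas_alt (data : String) : List String × (List (String × List (Int × Int))) :=
  let rows := (PySem.Str.split? data "\n").getD []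
  let inp_map := rows.filter (fun r => r != "")
  let seen := rows.foldl pvSeenRow []
  let antennas := seen.foldl (fun d c => d.insert (pvKey c) (pvPositions rows c)) PySem.Dict.empty
  (inp_map, antennas.items)

-- ===== PRECONDITION & SPEC =====
def Spec_get_antennas (data : String) (out : List String × (List (String × List (Int × Int)))) : Prop := out = get_antennas_alt data
instance (data : String) (out : List String × (List (String × List (Int × Int)))) : Decidable (Spec_get_antennas data out) := by unfold Spec_get_antennas; infer_instance

-- ===== CLAIM (what is proved, stated in full; the proofs are below) =====
def Claim_equal_get_antennas : Prop := ∀ (data : String), Dom_get_antennas data → Spec_get_antennas data (get_antennas data)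

-- ===== LEMMAS AND PROOFS =====

-- proof-only abbreviations: the flat record list A processes, and the grouping step
def pvMStep (d : AntDict) (p : String × (Int × Int)) : AntDict := d.modify p.1 [] (· ++ [p.2])

def pvRowRecs (i : Int) (row : String) : List (String × (Int × Int)) :=
  ((PySem.List.enumerate row.toList).filter (fun q => q.2 != '.')).map (fun q => (pvKey q.2, (i, q.1)))

def pvAllChars (rows : List String) : List Char :=
  rows.flatMap (fun row => row.toList.filter (fun c => c != '.'))

theorem pvKey_inj {a b : Char} (h : pvKey a = pvKey b) : a = b := by
  simpa [pvKey] using congrArg String.toList h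

-- A's character step is always a 'modify append' (insert of a fresh key = modify)
theorem stepA_eq (i : Int) (d : AntDict) (q : Int × Char) (h : q.2 ≠ '.') :
    pvStepA i d q = pvMStep d (pvKey q.2, (i, q.1)) := by
  simp only [pvStepA, pvMStep, if_pos h]
  by_cases hc : d.contains (pvKey q.2)
  · rw [if_pos hc]
  · rw [if_neg hc]
    have hc' : d.contains (pvKey q.2) = false := by simpa using hc
    simp [PySem.Dict.modify, PySem.Dict.getD_of_not_contains d (h := hc')]

-- A's inner loop over a row = the grouping fold over that row's flat records
theorem inner_eq (l : List (Int × Char)) (i : Int) (d : AntDict) :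
    l.foldl (pvStepA i) d =
      (((l.filter (fun q => q.2 != '.')).map (fun q => (pvKey q.2, (i, q.1)))).foldl pvMStep d) := by
  induction l generalizing d with
  | nil => rfl
  | cons q l ih =>
    by_cases h : (q.2 != '.') = true
    · have h' : q.2 ≠ '.' := by simpa using h
      simp only [List.foldl_cons, List.filter_cons, h, if_pos, List.map_cons,
        stepA_eq i d q h', ih]
    · have h' : pvStepA i d q = d := by
        simp only [pvStepA]
        rw [if_neg (by simpa using h)]
      simp only [List.foldl_cons, List.filter_cons, h, Bool.false_eq_true, if_false, h', ih]

-- A's whole loop = (filtered map, grouping fold over all flat records)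
theorem outer_eq (rows : List String) (s : Int) (acc : List String) (d : AntDict) :
    (PySem.List.enumerate rows s).foldl pvOuterA (acc, d) =
      (acc ++ rows.filter (fun r => r != ""),
       ((PySem.List.enumerate rows s).flatMap (fun p => pvRowRecs p.1 p.2)).foldl pvMStep d) := by
  induction rows generalizing s acc d with
  | nil => simp [PySem.List.enumerate_nil]
  | cons row rows ih =>
    rw [PySem.List.enumerate_cons]
    by_cases h : row = ""
    · subst h
      simp only [List.foldl_cons, List.flatMap_cons, pvOuterA, ih]
      simp [pvRowRecs, PySem.List.enumerate_nil]
    · simp only [List.foldl_cons, List.flatMap_cons, pvOuterA, if_neg h, ih,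
        List.filter_cons, List.foldl_append]
      rw [if_pos (by simpa using h)]
      simp [pvRowRecs, inner_eq, List.append_assoc]

-- B's seen loop over one row = Set.update with the row's non-'.' characters
theorem seenRow_eq (l : List Char) (s : List Char) :
    l.foldl (fun s ch => if ch ≠ '.' ∧ ch ∉ s then s ++ [ch] else s) s =
      PySem.Set.update s (l.filter (fun c => c != '.')) := by
  induction l generalizing s with
  | nil => rfl
  | cons c l ih =>
    simp only [List.foldl_cons, List.filter_cons]
    have hstep : (if c ≠ '.' ∧ c ∉ s then s ++ [c] else s) =
        if (c != '.') = true then PySem.Set.add s c else s := by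
      by_cases h : c = '.' <;> by_cases hm : c ∈ s <;>
        simp [PySem.Set.add, h, hm]
    rw [hstep]
    by_cases h : (c != '.') = true
    · rw [if_pos h, if_pos h, ih]
      rfl
    · rw [if_neg h, if_neg h, ih]

-- B's whole seen loop = the ordered set of all non-'.' characters of the grid
theorem seen_eq (rows : List String) (s : List Char) :
    rows.foldl pvSeenRow s = PySem.Set.update s (pvAllChars rows) := by
  induction rows generalizing s with
  | nil => rfl
  | cons row rows ih =>
    simp only [List.foldl_cons, pvAllChars, List.flatMap_cons, pvSeenRow, seenRow_eq, ih]
    show PySem.Set.update _ _ = PySem.Set.update s (_ ++ _)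
    simp only [PySem.Set.update, List.foldl_append]

-- projecting the records' keys recovers the characters (enumerate commutes with filter/map on snd)
theorem enum_filter_map_snd {β : Type} (l : List Char) (s : Int) (p : Char → Bool) (f : Char → β) :
    (((PySem.List.enumerate l s).filter (fun q => p q.2)).map (fun q => f q.2)) = (l.filter p).map f := by
  induction l generalizing s with
  | nil => simp [PySem.List.enumerate_nil]
  | cons c l ih =>
    rw [PySem.List.enumerate_cons]
    by_cases h : p c = true
    · simp only [List.filter_cons, h, if_pos, List.map_cons]
      rw [ih]
    · simp only [List.filter_cons, h, Bool.false_eq_true, if_false]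
      rw [ih]

theorem recs_fst (rows : List String) (s : Int) :
    ((PySem.List.enumerate rows s).flatMap (fun p => pvRowRecs p.1 p.2)).map (·.1) =
      (pvAllChars rows).map pvKey := by
  induction rows generalizing s with
  | nil => simp [PySem.List.enumerate_nil, pvAllChars]
  | cons row rows ih =>
    rw [PySem.List.enumerate_cons]
    simp only [List.flatMap_cons, List.map_append, pvAllChars, ih]
    congr 1
    simp only [pvRowRecs, List.map_map, Function.comp_def]
    exact enum_filter_map_snd row.toList 0 (fun c => c != '.') pvKey

-- Set.update commutes with an injective map
theorem update_map_pvKey (l : List Char) (s : List Char) :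
    PySem.Set.update (s.map pvKey) (l.map pvKey) = (PySem.Set.update s l).map pvKey := by
  induction l generalizing s with
  | nil => rfl
  | cons c l ih =>
    show PySem.Set.update (PySem.Set.add (s.map pvKey) (pvKey c)) (l.map pvKey) = _
    have : PySem.Set.add (s.map pvKey) (pvKey c) = (PySem.Set.add s c).map pvKey := by
      simp only [PySem.Set.add]
      by_cases hm : c ∈ s
      · simp [hm, List.mem_map_of_mem]
      · have : pvKey c ∉ s.map pvKey := by
          intro hx
          obtain ⟨a, ha, he⟩ := List.mem_map.mp hx
          exact hm (pvKey_inj he ▸ ha)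
        simp [hm, this]
    rw [this, ih]
    rfl

theorem key_pred (a c : Char) (hc : c ≠ '.') :
    ((pvKey a == pvKey c) && (a != '.')) = (a == c) := by
  by_cases h : a = c
  · subst h; simp [hc]  -- a = c: both sides true
  · have h1 : (pvKey a == pvKey c) = false := by
      simpa using fun he => h (pvKey_inj he)
    have h2 : (a == c) = false := by simpa using h
    rw [h1, h2, Bool.false_and]

-- B's per-character grid scan = filtering the flat records by that character's key
theorem positions_eq (rows : List String) (s : Int) (c : Char) (hc : c ≠ '.') :
    (PySem.List.enumerate rows s).flatMap (fun p =>
        ((PySem.List.enumerate p.2.toList).filter (fun q => q.2 == c)).map (fun q => (p.1, q.1))) =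
      ((((PySem.List.enumerate rows s).flatMap (fun p => pvRowRecs p.1 p.2)).filter
          (fun p => p.1 == pvKey c)).map (·.2)) := by
  induction rows generalizing s with
  | nil => simp [PySem.List.enumerate_nil]
  | cons row rows ih =>
    rw [PySem.List.enumerate_cons]
    simp only [List.flatMap_cons, List.filter_append, List.map_append, ih]
    congr 1
    simp only [pvRowRecs, List.filter_map, List.map_map, Function.comp_def, List.filter_filter]
    have : ∀ q : Int × Char, ((pvKey q.2 == pvKey c) && (q.2 != '.')) = (q.2 == c) :=
      fun q => key_pred q.2 c hc
    simp only [this]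

-- every character in pvAllChars is not '.'
theorem mem_allChars_ne (rows : List String) (c : Char) (h : c ∈ pvAllChars rows) : c ≠ '.' := by
  simp only [pvAllChars, List.mem_flatMap, List.mem_filter] at h
  obtain ⟨row, _, _, hc⟩ := h
  simpa using hc

-- ===== VERDICT (by name: the statement is the Claim_ definition above) =====
theorem get_antennas_spec : Claim_equal_get_antennas := by
  intro data _
  show get_antennas data = get_antennas_alt data
  simp only [get_antennas, get_antennas_alt]
  set rows := (PySem.Str.split? data "\n").getD [] with hrows
  rw [outer_eq rows 0 [] PySem.Dict.empty]
  simp only [List.nil_append]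
  congr 1
  -- the dictionaries have equal item lists
  set R := (PySem.List.enumerate rows 0).flatMap (fun p => pvRowRecs p.1 p.2) with hR
  -- A side: items of the grouping fold
  have hkeys : (R.foldl pvMStep PySem.Dict.empty).keys =
      PySem.Set.update PySem.Dict.empty.keys (R.map (·.1)) :=
    PySem.Dict.keys_foldl_modify_key R (·.1) [] (fun d x => (· ++ [x.2])) PySem.Dict.empty
  have hnodup : (R.foldl pvMStep PySem.Dict.empty).keys.Nodup :=
    PySem.Dict.nodup_keys_foldl_modify_key R (·.1) [] (fun d x => (· ++ [x.2]))
      PySem.Dict.empty (by simp [PySem.Dict.empty, PySem.Dict.keys])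
  have hitemsA : (R.foldl pvMStep PySem.Dict.empty).items =
      (PySem.Set.ofList (R.map (·.1))).map
        (fun k => (k, (R.filter (fun p => p.1 == k)).map (·.2))) := by
    rw [PySem.Dict.items_eq_map_keys _ hnodup []]
    rw [hkeys]
    refine List.map_congr_left ?_
    intro k _
    have hfun : pvMStep = fun (d : AntDict) (p : String × (Int × Int)) => d.modify p.1 [] (· ++ [p.2]) := rfl
    rw [hfun, PySem.Dict.getD_foldl_modify_append]
    simp
  -- B side: seen and the insert fold over fresh keys
  have hseen : rows.foldl pvSeenRow [] = PySem.Set.ofList (pvAllChars rows) := seen_eq rows []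
  have hseennd : (rows.foldl pvSeenRow []).Nodup := by
    rw [hseen]; exact PySem.Set.nodup_ofList _
  have hmapnd : ((rows.foldl pvSeenRow []).map pvKey).Nodup :=
    hseennd.map (fun a b h => pvKey_inj h)
  have hitemsB : ((rows.foldl pvSeenRow []).foldl
        (fun d c => d.insert (pvKey c) (pvPositions rows c)) PySem.Dict.empty).items =
      (rows.foldl pvSeenRow []).map (fun c => (pvKey c, pvPositions rows c)) := by
    rw [PySem.Dict.items_foldl_insert_fresh _ _ _ _ (by intro a _; simp) hmapnd]
    simp [PySem.Dict.empty]
  rw [hitemsA, hitemsB, hseen]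
  -- keys of A's dict = pvKey-image of seen
  have hfst : R.map (·.1) = (pvAllChars rows).map pvKey := recs_fst rows 0
  rw [hfst]
  have : PySem.Set.ofList ((pvAllChars rows).map pvKey) =
      (PySem.Set.ofList (pvAllChars rows)).map pvKey := by
    show PySem.Set.update (([] : List Char).map pvKey) _ = _
    exact update_map_pvKey (pvAllChars rows) []
  rw [this, List.map_map]
  refine List.map_congr_left ?_
  intro c hcmem
  have hc : c ≠ '.' := mem_allChars_ne rows c (by simpa [PySem.Set.mem_ofList] using hcmem)
  simp only [Function.comp_def]
  congr 1
  exact (positions_eq rows 0 c hc).symm
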